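-- pv_equiv track=rewrite | github.com/Nekitori17/Program-Exercise-Next | 36_Mua_ve_part_2/B36.py | mua_ve
-- ===== SOURCE A (Python) =====
-- def mua_ve(cac_ve: list[int], ngan_sach: int) -> list[int]:
--   cac_ve_da_mua: list[int] = []
--   cac_ve.sort()
--   if cac_ve[0] > ngan_sach:
--     return [-1]
--   else:
--     for ve in cac_ve:
--       if ve <= ngan_sach:
--         ngan_sach -= ve
--         cac_ve_da_mua.append(ve)
--       else:
--         break
--     return cac_ve_da_mua
-- ===== SOURCE B (Python) =====
-- def _buy(s, budget):
--     # s: a chunk of the sorted list; returns (tickets bought greedily from its front, remaining budget)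
--     if len(s) <= 1:
--         if s and s[0] <= budget:
--             return s[:], budget - s[0]
--         return [], budget
--     mid = len(s) // 2
--     left, rem = _buy(s[:mid], budget)
--     if len(left) < mid:          # stopped inside the left half: the right half is never reached
--         return left, rem
--     right, rem = _buy(s[mid:], rem)
--     return left + right, rem
--
--
-- def mua_ve(cac_ve: list[int], ngan_sach: int) -> list[int]:
--     cac_ve.sort()
--     return _buy(cac_ve, ngan_sach)[0] or [-1]
-- ===== Notes on version B (the rewrite author's own statement) =====
-- stated objective: alternative
-- what changed: B replaces A's single budget-decrementing scan with a divide-and-conquer recursion: it buys greedily in the left half of the sorted list, and only if that half is bought completely continues into the right half with the remaining budget, concatenating the two results; the [-1] case falls out of the empty result instead of a separate min-vs-budget guard.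
import Mathlib
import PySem

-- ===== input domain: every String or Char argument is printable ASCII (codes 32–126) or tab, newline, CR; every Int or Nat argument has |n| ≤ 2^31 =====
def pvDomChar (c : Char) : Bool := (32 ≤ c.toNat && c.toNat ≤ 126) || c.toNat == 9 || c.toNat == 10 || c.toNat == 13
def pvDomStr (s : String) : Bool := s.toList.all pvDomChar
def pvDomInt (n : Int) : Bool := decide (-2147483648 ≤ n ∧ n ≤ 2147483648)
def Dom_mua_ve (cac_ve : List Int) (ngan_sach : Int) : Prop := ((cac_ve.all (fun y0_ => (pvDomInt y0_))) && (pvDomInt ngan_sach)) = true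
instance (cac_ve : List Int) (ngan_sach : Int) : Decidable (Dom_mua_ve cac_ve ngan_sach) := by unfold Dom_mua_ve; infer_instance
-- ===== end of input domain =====

-- B buys greedily by divide and conquer on the sorted list (left half first, right half only if the
-- left half was bought completely) instead of A's budget-decrementing linear scan (objective:
-- alternative). Both A and B sort cac_ve in place; the equivalence proved is about the RETURN value.

-- ===== PORT A =====
-- A's for-loop: remaining budget b, accumulator of bought tickets; break on first ve > b.
def muaVeLoopA : List Int → Int → List Int → List Int
  | [], _, acc => acc
  | ve :: rest, b, acc => if ve ≤ b then muaVeLoopA rest (b - ve) (acc ++ [ve]) else acc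

def mua_ve (cac_ve : List Int) (ngan_sach : Int) : List Int :=
  let s := PySem.List.sorted cac_ve (fun x => x) false
  match PySem.List.pyGet? s 0 with
  | none => []   -- Python raises IndexError here (empty list); excluded by Pre_mua_ve
  | some h => if h > ngan_sach then [-1] else muaVeLoopA s ngan_sach []

-- ===== PORT B =====
-- Source B's _buy: on a chunk of length ≤ 1 buy the single affordable ticket if any; otherwise split at
-- mid, buy in the left half, and continue into the right half only if all of the left was bought.
-- Fuel (= initial length) makes the halving recursion structural; the 0-fuel branch is unreachable
-- since the fuel always dominates the chunk length.
def muaVeBuyF (fuel : Nat) (s : List Int) (b : Int) : List Int × Int :=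
  if s.length ≤ 1 then
    match s with
    | [] => ([], b)
    | x :: _ => if x ≤ b then ([x], b - x) else ([], b)
  else
    match fuel with
    | 0 => ([], b)
    | fuel + 1 =>
      let mid := s.length / 2
      let lr := muaVeBuyF fuel (s.take mid) b
      if lr.1.length < mid then lr
      else
        let rr := muaVeBuyF fuel (s.drop mid) lr.2
        (lr.1 ++ rr.1, rr.2)

def muaVeBuy (s : List Int) (b : Int) : List Int × Int := muaVeBuyF s.length s b

def mua_ve_alt (cac_ve : List Int) (ngan_sach : Int) : List Int :=
  let s := PySem.List.sorted cac_ve (fun x => x) false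
  let bought := (muaVeBuy s ngan_sach).1
  if bought = [] then [-1] else bought   -- Python's 'bought or [-1]'

-- ===== PRECONDITION & SPEC =====
-- Pre_ excludes exactly the empty list, on which A (cac_ve[0]) raises IndexError.
def Pre_mua_ve (cac_ve : List Int) (ngan_sach : Int) : Prop := cac_ve ≠ []
instance (cac_ve : List Int) (ngan_sach : Int) : Decidable (Pre_mua_ve cac_ve ngan_sach) := by unfold Pre_mua_ve; infer_instance

def pvWitness_mua_ve : List Int × Int := ([3, 1, 2], 4)

def Spec_mua_ve (cac_ve : List Int) (ngan_sach : Int) (out : List Int) : Prop := out = mua_ve_alt cac_ve ngan_sach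
instance (cac_ve : List Int) (ngan_sach : Int) (out : List Int) : Decidable (Spec_mua_ve cac_ve ngan_sach out) := by unfold Spec_mua_ve; infer_instance

-- ===== CLAIM (what is proved, stated in full; the proofs are below) =====
def Claim_equal_mua_ve : Prop := ∀ (cac_ve : List Int) (ngan_sach : Int), Dom_mua_ve cac_ve ngan_sach → Pre_mua_ve cac_ve ngan_sach → Spec_mua_ve cac_ve ngan_sach (mua_ve cac_ve ngan_sach)

-- ===== LEMMAS AND PROOFS =====

-- Reference greedy: straight structural recursion returning (bought prefix, remaining budget).
def greedyRef : List Int → Int → List Int × Int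
  | [], b => ([], b)
  | v :: r, b =>
      if v ≤ b then
        let p := greedyRef r (b - v)
        (v :: p.1, p.2)
      else ([], b)

lemma greedyRef_length_le (s : List Int) : ∀ b : Int, (greedyRef s b).1.length ≤ s.length := by
  induction s with
  | nil => intro b; simp [greedyRef]
  | cons v r ih =>
      intro b
      simp only [greedyRef]
      split_ifs with h
      · simpa using ih (b - v)
      · simp

-- A's loop is the reference greedy with the accumulator appended in front.
lemma loopA_eq_greedy (s : List Int) : ∀ (b : Int) (acc : List Int),
    muaVeLoopA s b acc = acc ++ (greedyRef s b).1 := by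
  induction s with
  | nil => intro b acc; simp [muaVeLoopA, greedyRef]
  | cons v r ih =>
      intro b acc
      simp only [muaVeLoopA, greedyRef]
      split_ifs with h
      · rw [ih (b - v) (acc ++ [v])]; simp
      · simp

-- Greedy over a concatenation: the right part is reached iff the left part is bought completely.
lemma greedy_append (xs : List Int) : ∀ (ys : List Int) (b : Int),
    greedyRef (xs ++ ys) b =
      if (greedyRef xs b).1.length = xs.length then
        ((greedyRef xs b).1 ++ (greedyRef ys (greedyRef xs b).2).1,
         (greedyRef ys (greedyRef xs b).2).2)
      else greedyRef xs b := by
  induction xs with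
  | nil => intro ys b; simp [greedyRef]
  | cons v r ih =>
      intro ys b
      by_cases h : v ≤ b
      · have hstep : ∀ (zs : List Int), greedyRef (v :: zs) b =
            (v :: (greedyRef zs (b - v)).1, (greedyRef zs (b - v)).2) := by
          intro zs; simp [greedyRef, h]
        rw [List.cons_append, hstep (r ++ ys), hstep r, ih ys (b - v)]
        by_cases hl : (greedyRef r (b - v)).1.length = r.length
        · rw [if_pos hl, if_pos (by simp [hl])]
          simp
        · rw [if_neg hl, if_neg (by simp only [List.length_cons]; omega)]
      · have hstep : ∀ (zs : List Int), greedyRef (v :: zs) b = ([], b) := by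
          intro zs; simp [greedyRef, h]
        rw [List.cons_append, hstep (r ++ ys), hstep r, if_neg (by simp)]

-- B's divide-and-conquer equals the reference greedy (induction on the fuel).
lemma muaVeBuyF_eq_greedy (fuel : Nat) : ∀ (s : List Int) (b : Int), s.length ≤ fuel + 1 →
    muaVeBuyF fuel s b = greedyRef s b := by
  induction fuel with
  | zero =>
      intro s b hlen
      rw [muaVeBuyF.eq_def]
      match s, hlen with
      | [], _ => simp [greedyRef]
      | [x], _ =>
          by_cases hx : x ≤ b <;> simp [greedyRef, hx]
  | succ n ih =>
      intro s b hlen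
      rw [muaVeBuyF.eq_def]
      by_cases hle : s.length ≤ 1
      · rw [if_pos hle]
        match s, hle with
        | [], _ => simp [greedyRef]
        | [x], _ =>
            by_cases hx : x ≤ b <;> simp [greedyRef, hx]
      · rw [if_neg hle]
        simp only []
        have hlen2 : 2 ≤ s.length := by omega
        have htk : (s.take (s.length / 2)).length = s.length / 2 := by
          simp; omega
        have hdr : (s.drop (s.length / 2)).length = s.length - s.length / 2 := by simp
        rw [ih (s.take (s.length / 2)) b (by omega)]
        rw [ih (s.drop (s.length / 2)) _ (by omega)]
        conv_rhs => rw [show s = s.take (s.length / 2) ++ s.drop (s.length / 2) by simp]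
        rw [greedy_append]
        have hlenle : ((greedyRef (s.take (s.length / 2)) b).1).length ≤ s.length / 2 := by
          have := greedyRef_length_le (s.take (s.length / 2)) b
          omega
        by_cases hstop : ((greedyRef (s.take (s.length / 2)) b).1).length < s.length / 2
        · rw [if_pos hstop, if_neg (by omega)]
        · rw [if_neg hstop, if_pos (by omega)]

lemma muaVeBuy_eq_greedy' (s : List Int) (b : Int) : muaVeBuy s b = greedyRef s b :=
  muaVeBuyF_eq_greedy s.length s b (by omega)

theorem mua_ve_spec_aux (cac_ve : List Int) (ngan_sach : Int)
    (hpre : Pre_mua_ve cac_ve ngan_sach) :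
    mua_ve cac_ve ngan_sach = mua_ve_alt cac_ve ngan_sach := by
  simp only [mua_ve, mua_ve_alt]
  have hne : PySem.List.sorted cac_ve (fun x => x) false ≠ [] := by
    intro h
    have hp := PySem.List.sorted_perm (xs := cac_ve) (key := fun x => x) (rev := false)
    rw [h] at hp
    exact hpre hp.symm.eq_nil
  cases hs : PySem.List.sorted cac_ve (fun x => x) false with
  | nil => exact absurd hs hne
  | cons h t =>
      simp only [PySem.List.pyGet?, PySem.List.pyIdx?]
      norm_num
      rw [muaVeBuy_eq_greedy']
      by_cases hgt : ngan_sach < h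
      · have he : (greedyRef (h :: t) ngan_sach).1 = [] := by
          have : ¬ h ≤ ngan_sach := by omega
          simp [greedyRef, this]
        simp [hgt, he]
      · have h1 : h ≤ ngan_sach := by omega
        rw [loopA_eq_greedy]
        have hc : (greedyRef (h :: t) ngan_sach).1
            = h :: (greedyRef t (ngan_sach - h)).1 := by
          simp [greedyRef, h1]
        simp [hgt, hc]

-- ===== VERDICT (by name: the statement is the Claim_ definition above) =====
theorem mua_ve_spec : Claim_equal_mua_ve := by
  intro cac_ve ngan_sach _ hpre
  exact mua_ve_spec_aux cac_ve ngan_sach hpre
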